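-- pv_equiv track=rewrite | github.com/skyturtlerocket/FlameFlux-v1 | runProduction.py | find_outer_perimeter
-- ===== SOURCE A (Python) =====
-- def find_outer_perimeter(pixel_coordinates):
--     """
--     Find the outermost pixels that form the perimeter
--     """
--     pixel_set = set(pixel_coordinates)
--     outer_boundary = []
--
--     for x, y in pixel_coordinates:
--         #check if this pixel is on the outer edge
--         #a pixel is on outer edge if it has empty space in outward directions
--
--         #check 8 directions around the pixel
--         neighbors = [
--             (x-1, y-1), (x, y-1), (x+1, y-1),
--             (x-1, y),             (x+1, y),
--             (x-1, y+1), (x, y+1), (x+1, y+1)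
--         ]
--
--         #count how many neighbors are NOT fire pixels
--         empty_neighbors = sum(1 for neighbor in neighbors if neighbor not in pixel_set)
--
--         #if it has empty neighbors, it's a boundary pixel
--         if empty_neighbors > 0:
--             #additional check: is it on the OUTER boundary?
--             #calculate distance from centroid to determine if it's outer edge
--             outer_boundary.append((x, y))
--
--     return outer_boundary
-- ===== SOURCE B (Python) =====
-- def find_outer_perimeter(pixel_coordinates):
--     """
--     Find the outermost pixels that form the perimeter
--     """
--     # scatter pass: each distinct fire pixel contributes +1 to each of its
--     # 8 neighbor cells; counts[p] = number of distinct fire pixels adjacent to p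
--     counts = {}
--     for qx, qy in set(pixel_coordinates):
--         for dx in (-1, 0, 1):
--             for dy in (-1, 0, 1):
--                 if dx != 0 or dy != 0:
--                     key = (qx + dx, qy + dy)
--                     counts[key] = counts.get(key, 0) + 1
--     # a pixel is on the boundary iff fewer than 8 of its neighbors are fire
--     return [p for p in pixel_coordinates if counts.get(p, 0) < 8]
-- ===== Notes on version B (the rewrite author's own statement) =====
-- stated objective: alternative
-- what changed: B inverts the data flow: instead of gathering (testing each pixel's 8 neighbors against the set), it scatters - one pass over the distinct pixels increments a counter at each of their 8 neighbor cells, so counts[p] is the number of adjacent fire pixels, and the final pass keeps list elements with counts < 8; no neighbor-membership test remains.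
import Mathlib
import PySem

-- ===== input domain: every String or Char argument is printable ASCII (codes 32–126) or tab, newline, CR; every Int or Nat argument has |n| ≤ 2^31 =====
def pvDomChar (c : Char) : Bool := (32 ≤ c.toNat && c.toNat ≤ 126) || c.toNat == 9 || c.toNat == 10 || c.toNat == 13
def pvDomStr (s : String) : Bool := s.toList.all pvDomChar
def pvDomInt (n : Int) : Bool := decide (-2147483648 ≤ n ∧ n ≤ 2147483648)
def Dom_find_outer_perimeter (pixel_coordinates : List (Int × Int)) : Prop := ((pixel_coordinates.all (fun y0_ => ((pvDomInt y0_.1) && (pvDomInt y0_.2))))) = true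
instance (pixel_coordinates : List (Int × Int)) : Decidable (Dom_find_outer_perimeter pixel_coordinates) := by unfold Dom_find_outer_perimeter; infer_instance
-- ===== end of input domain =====

-- B inverts the data flow: it scatters +1 counts from each distinct pixel to its
-- 8 neighbor cells and then keeps list elements whose count is < 8, instead of
-- testing each pixel's neighbors against the set (objective: alternative).

-- ===== PORT A =====
def find_outer_perimeter (pixel_coordinates : List (Int × Int)) : List (Int × Int) :=
  let pixel_set : PySem.Set (Int × Int) := PySem.Set.ofList pixel_coordinates
  pixel_coordinates.foldl (fun outer_boundary p =>
    let x := p.1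
    let y := p.2
    let neighbors : List (Int × Int) :=
      [(x-1, y-1), (x, y-1), (x+1, y-1),
       (x-1, y),             (x+1, y),
       (x-1, y+1), (x, y+1), (x+1, y+1)]
    -- sum(1 for neighbor in neighbors if neighbor not in pixel_set) = countP
    let empty_neighbors := neighbors.countP (fun n => !(PySem.Set.contains pixel_set n))
    if 0 < empty_neighbors then outer_boundary ++ [(x, y)] else outer_boundary) []

-- ===== PORT B =====
-- the nested 'for dx … for dy … if dx != 0 or dy != 0' offset loops of Source B
def pvDeltas : List (Int × Int) :=
  ([-1, 0, 1] : List Int).flatMap (fun dx =>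
    ([-1, 0, 1] : List Int).filterMap (fun dy =>
      if dx ≠ 0 ∨ dy ≠ 0 then some (dx, dy) else none))

def find_outer_perimeter_alt (pixel_coordinates : List (Int × Int)) : List (Int × Int) :=
  -- scatter pass over the distinct pixels (order-insensitive: only looked up later)
  let counts : PySem.Dict (Int × Int) Int :=
    (PySem.Set.ofList pixel_coordinates).foldl (fun counts q =>
      pvDeltas.foldl (fun counts d =>
        counts.modify (q.1 + d.1, q.2 + d.2) 0 (· + 1)) counts)
      PySem.Dict.empty
  pixel_coordinates.filter (fun p => counts.getD p 0 < 8)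

-- ===== PRECONDITION & SPEC =====
def Spec_find_outer_perimeter (pixel_coordinates : List (Int × Int)) (out : List (Int × Int)) : Prop := out = find_outer_perimeter_alt pixel_coordinates
instance (pixel_coordinates : List (Int × Int)) (out : List (Int × Int)) : Decidable (Spec_find_outer_perimeter pixel_coordinates out) := by unfold Spec_find_outer_perimeter; infer_instance

-- ===== CLAIM =====
def Claim_equal_find_outer_perimeter : Prop := ∀ (pixel_coordinates : List (Int × Int)), Dom_find_outer_perimeter pixel_coordinates → Spec_find_outer_perimeter pixel_coordinates (find_outer_perimeter pixel_coordinates)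

-- ===== LEMMAS AND PROOFS =====

-- the 8 neighbor cells of p, in Source B's scatter order
def pvNeigh (p : Int × Int) : List (Int × Int) :=
  pvDeltas.map (fun d => (p.1 + d.1, p.2 + d.2))

theorem pvDeltas_eq : pvDeltas =
    [(-1,-1), (-1,0), (-1,1), (0,-1), (0,1), (1,-1), (1,0), (1,1)] := by decide

theorem pvNeigh_nodup (p : Int × Int) : (pvNeigh p).Nodup := by
  unfold pvNeigh
  refine List.Nodup.map ?_ (by decide)
  intro a b h
  simp only [Prod.mk.injEq] at h
  exact Prod.ext (by omega) (by omega)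

theorem pvNeigh_length (p : Int × Int) : (pvNeigh p).length = 8 := by
  rw [pvNeigh, List.length_map]; decide

theorem mem_pvNeigh (p q : Int × Int) : q ∈ pvNeigh p ↔
    (p.1 - 1 ≤ q.1 ∧ q.1 ≤ p.1 + 1 ∧ p.2 - 1 ≤ q.2 ∧ q.2 ≤ p.2 + 1 ∧
      ¬(q.1 = p.1 ∧ q.2 = p.2)) := by
  simp only [pvNeigh, pvDeltas_eq, List.map, List.mem_cons, List.not_mem_nil,
    or_false, Prod.ext_iff]
  constructor <;> intro h
  · rcases h with h|h|h|h|h|h|h|h <;> omega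
  · omega

-- the scattered counter: counts.getD p 0 = #{q ∈ l : p is a neighbor of q}
theorem pv_getD_scatter (l : List (Int × Int)) (d : PySem.Dict (Int × Int) Int) (p : Int × Int) :
    (l.foldl (fun counts q =>
        pvDeltas.foldl (fun counts dl =>
          counts.modify (q.1 + dl.1, q.2 + dl.2) 0 (· + 1)) counts) d).getD p 0
      = d.getD p 0 + (l.countP (fun q => decide (p ∈ pvNeigh q)) : Int) := by
  induction l generalizing d with
  | nil => simp
  | cons q l ih =>
    simp only [List.foldl_cons, ih, List.countP_cons]
    have hinner : (pvDeltas.foldl (fun counts dl =>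
        counts.modify (q.1 + dl.1, q.2 + dl.2) 0 (· + 1)) d).getD p 0
        = d.getD p 0 + ((pvNeigh q).count p : Int) := by
      have h2 := PySem.Dict.getD_foldl_modify_add_one (l := pvNeigh q) (d := d) (v := p)
      rw [pvNeigh, List.foldl_map] at h2
      exact h2
    rw [hinner]
    by_cases hm : p ∈ pvNeigh q
    · rw [List.count_eq_one_of_mem (pvNeigh_nodup q) hm]
      simp [hm]; ring
    · rw [List.count_eq_zero_of_not_mem hm]
      simp [hm]

-- counting intersections of two nodup lists is symmetric
theorem pv_countP_mem_comm {α : Type} [DecidableEq α] (l1 l2 : List α)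
    (h1 : l1.Nodup) (h2 : l2.Nodup) :
    l1.countP (fun a => decide (a ∈ l2)) = l2.countP (fun a => decide (a ∈ l1)) := by
  rw [List.countP_eq_length_filter, List.countP_eq_length_filter]
  refine List.Perm.length_eq ?_
  rw [List.perm_ext_iff_of_nodup (h1.filter _) (h2.filter _)]
  intro a
  simp only [List.mem_filter, decide_eq_true_eq]
  tauto

-- A's neighbor list is a permutation of Source B's scatter neighborhood
theorem pv_neighborsA_perm (p : Int × Int) :
    [(p.1-1, p.2-1), (p.1, p.2-1), (p.1+1, p.2-1),
     (p.1-1, p.2), (p.1+1, p.2),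
     (p.1-1, p.2+1), (p.1, p.2+1), (p.1+1, p.2+1)].Perm (pvNeigh p) := by
  have h : [(p.1-1, p.2-1), (p.1, p.2-1), (p.1+1, p.2-1),
     (p.1-1, p.2), (p.1+1, p.2),
     (p.1-1, p.2+1), (p.1, p.2+1), (p.1+1, p.2+1)]
      = ([(-1,-1), (0,-1), (1,-1), (-1,0), (1,0), (-1,1), (0,1), (1,1)] :
          List (Int × Int)).map (fun d => (p.1 + d.1, p.2 + d.2)) := by
    simp [List.map, sub_eq_add_neg]
  rw [h, pvNeigh]
  exact List.Perm.map _ (by decide)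

-- pointwise equality of the two tests
theorem pv_pointwise (pc : List (Int × Int)) (p : Int × Int) :
    (decide (0 < List.countP
        (fun n => !(PySem.Set.contains (PySem.Set.ofList pc) n))
        [(p.1-1, p.2-1), (p.1, p.2-1), (p.1+1, p.2-1),
         (p.1-1, p.2), (p.1+1, p.2),
         (p.1-1, p.2+1), (p.1, p.2+1), (p.1+1, p.2+1)]))
      = decide (((PySem.Set.ofList pc).foldl (fun counts q =>
          pvDeltas.foldl (fun counts d =>
            counts.modify (q.1 + d.1, q.2 + d.2) 0 (· + 1)) counts)
          (PySem.Dict.empty : PySem.Dict (Int × Int) Int)).getD p 0 < 8) := by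
  rw [pv_getD_scatter (PySem.Set.ofList pc) PySem.Dict.empty p]
  have hmemN : ∀ q, (decide (p ∈ pvNeigh q)) = decide (q ∈ pvNeigh p) := by
    intro q
    simp only [decide_eq_decide, mem_pvNeigh p q, mem_pvNeigh q p]
    omega
  have hswap : (PySem.Set.ofList pc).countP (fun q => decide (p ∈ pvNeigh q))
      = (pvNeigh p).countP (fun n => decide (n ∈ PySem.Set.ofList pc)) := by
    rw [List.countP_congr (fun q _ => by rw [hmemN q])]
    have h := pv_countP_mem_comm (PySem.Set.ofList pc) (pvNeigh p)
      (PySem.Set.nodup_ofList pc) (pvNeigh_nodup p)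
    convert h using 2 <;> funext a <;> simp
  have hperm := (pv_neighborsA_perm p).countP_eq
    (fun n => !(PySem.Set.contains (PySem.Set.ofList pc) n))
  have hsplit : (pvNeigh p).countP (fun n => !(PySem.Set.contains (PySem.Set.ofList pc) n))
      + (pvNeigh p).countP (fun n => decide (n ∈ PySem.Set.ofList pc)) = 8 := by
    have hl := List.length_eq_countP_add_countP
      (fun n => decide (n ∈ PySem.Set.ofList pc)) (l := pvNeigh p)
    simp only [Bool.decide_eq_true, decide_not] at hl
    have hlen := pvNeigh_length p
    have hcompl : (pvNeigh p).countP (fun n => !(PySem.Set.contains (PySem.Set.ofList pc) n))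
        = (pvNeigh p).countP (fun n => !(decide (n ∈ PySem.Set.ofList pc))) := by
      refine List.countP_congr (fun n _ => ?_)
      simp
    omega
  rw [PySem.Dict.getD_empty, Bool.eq_iff_iff]
  simp only [decide_eq_true_eq]
  rw [hperm, hswap]
  omega

-- ===== VERDICT =====
theorem find_outer_perimeter_spec : Claim_equal_find_outer_perimeter := by
  intro pc _
  unfold Spec_find_outer_perimeter
  simp only [find_outer_perimeter, find_outer_perimeter_alt]
  rw [PySem.List.foldl_append_ite_eq_filter]
  rw [List.nil_append]
  exact List.filter_congr (fun p _ => pv_pointwise pc p)
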